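-- pv_equiv track=rewrite | github.com/VladislavJevremovic/Coding-Problem-Solutions | LeetCode/python/0151 Reverse Words in a String.py | trim_spaces
-- ===== SOURCE A (Python) =====
-- def trim_spaces(s: str) -> str:
--     left, right = 0, len(s) - 1
--     # remove leading spaces
--     while left <= right and s[left] == ' ':
--         left += 1
--
--     # remove trailing spaces
--     while left <= right and s[right] == ' ':
--         right -= 1
--
--     # reduce multiple spaces to single one
--     output = []
--     while left <= right:
--         if s[left] != ' ':
--             output.append(s[left])
--         elif output[-1] != ' ':
--             output.append(s[left])
--         left += 1
--
--     return output
-- ===== SOURCE B (Python) =====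
-- def trim_spaces(s: str) -> str:
--     return list(' '.join(filter(None, s.split(' '))))
-- ===== Notes on version B (the rewrite author's own statement) =====
-- stated objective: idiomatic
-- what changed: A's three manual pointer loops (trim left, trim right, guarded char-by-char copy that inspects the last appended char) are replaced by tokenize-then-join: split on the space character, drop empty tokens, join with single spaces; leading/trailing/run collapsing all fall out of the split.
import Mathlib
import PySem

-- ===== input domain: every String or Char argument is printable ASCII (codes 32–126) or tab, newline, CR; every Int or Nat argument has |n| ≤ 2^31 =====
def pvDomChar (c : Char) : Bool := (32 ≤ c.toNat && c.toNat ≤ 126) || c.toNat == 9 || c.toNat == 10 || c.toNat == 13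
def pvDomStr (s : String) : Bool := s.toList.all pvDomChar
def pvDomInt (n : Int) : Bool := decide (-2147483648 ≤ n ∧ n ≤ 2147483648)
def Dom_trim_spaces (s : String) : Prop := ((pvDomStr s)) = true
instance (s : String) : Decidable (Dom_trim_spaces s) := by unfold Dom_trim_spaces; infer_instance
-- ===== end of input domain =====

-- B rewrites A's guarded character-by-character scan as tokenize-then-join (split on ' ', drop empty tokens, rejoin); idiomatic, same cost.

-- ===== PORT A =====
-- 'while left <= right and s[left] == " ": left += 1' — the advancing pointer becomes structural recursion
def trimLeadA : List Char → List Char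
  | [] => []
  | c :: rest => if c = ' ' then trimLeadA rest else c :: rest

-- the third while loop: output accumulator; append unless previous appended char and current are both spaces
def scanA : List Char → List Char → List Char
  | out, [] => out
  | out, c :: rest =>
    if c ≠ ' ' then scanA (out ++ [c]) rest
    else if PySem.List.pyGet? out (-1) ≠ some ' ' then scanA (out ++ [c]) rest
    else scanA out rest

def trim_spaces (s : String) : List String :=
  let cs := s.toList
  let afterLeft := trimLeadA cs                        -- remove leading spaces
  let core := (trimLeadA afterLeft.reverse).reverse    -- remove trailing spaces (right pointer = scan from the end)
  (scanA [] core).map (fun c => String.mk [c])         -- Python's 1-char strings are Char here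

-- ===== PORT B =====
-- return list(' '.join(filter(None, s.split(' '))))
def trim_spaces_alt (s : String) : List String :=
  let parts := PySem.Chars.splitOn s.toList [' ']            -- s.split(' ')
  let toks := parts.filter (fun w => w ≠ ([] : List Char))   -- filter(None, …)
  (PySem.Chars.join [' '] toks).map (fun c => String.mk [c]) -- list(' '.join(…))

-- ===== PRECONDITION & SPEC =====
def Spec_trim_spaces (s : String) (out : List String) : Prop := out = trim_spaces_alt s
instance (s : String) (out : List String) : Decidable (Spec_trim_spaces s out) := by unfold Spec_trim_spaces; infer_instance

-- ===== CLAIM (what is proved, stated in full; the proofs are below) =====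
def Claim_equal_trim_spaces : Prop := ∀ (s : String), Dom_trim_spaces s → Spec_trim_spaces s (trim_spaces s)

-- ===== LEMMAS AND PROOFS =====

-- fuel-free split on ' ': (current word, remaining parts)
def mySplitP : List Char → List Char × List (List Char)
  | [] => ([], [])
  | c :: r => if c = ' ' then ([], (mySplitP r).1 :: (mySplitP r).2) else (c :: (mySplitP r).1, (mySplitP r).2)

def joinTail : List (List Char) → List Char
  | [] => []
  | w :: ws => ' ' :: PySem.Chars.join [' '] (w :: ws)

-- what A's scan emits while inside a word
def wRest (ds : List Char) : List Char :=
  (mySplitP ds).1 ++ joinTail (((mySplitP ds).2).filter (fun w => w ≠ ([] : List Char)))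

-- B's value, on char lists
def gVal (ds : List Char) : List Char :=
  PySem.Chars.join [' '] ((((mySplitP ds).1 :: (mySplitP ds).2)).filter (fun w => w ≠ ([] : List Char)))

-- state-machine form of A's third loop (state = last appended char)
def collapseF : Option Char → List Char → List Char
  | _, [] => []
  | last, c :: rest =>
    if c ≠ ' ' then c :: collapseF (some c) rest
    else if last ≠ some ' ' then c :: collapseF (some ' ') rest
    else collapseF last rest

theorem pyGet_neg_one (out : List Char) : PySem.List.pyGet? out (-1) = out.getLast? := by
  cases out with
  | nil => simp [PySem.List.pyGet?, PySem.List.pyIdx?]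
  | cons a l =>
    simp only [PySem.List.pyGet?, PySem.List.pyIdx?]
    norm_num
    rw [List.getLast?_eq_getElem?]
    simp

theorem scanA_eq (l : List Char) : ∀ out : List Char, scanA out l = out ++ collapseF out.getLast? l := by
  induction l with
  | nil => intro out; simp [scanA, collapseF]
  | cons c rest IH =>
    intro out
    by_cases hc : c = ' '
    · subst hc
      by_cases hl : out.getLast? = some ' '
      · simp [scanA, collapseF, pyGet_neg_one, hl]
        rw [IH out, hl]
      · simp [scanA, collapseF, pyGet_neg_one, hl]
        rw [IH (out ++ [' '])]
        simp
    · simp [scanA, collapseF, hc]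
      rw [IH (out ++ [c])]
      simp

theorem go_eq (fuel : Nat) : ∀ (l cur : List Char) (acc : List (List Char)), l.length ≤ fuel →
    PySem.Chars.splitOn.go [' '] fuel l cur acc
      = acc.reverse ++ (cur.reverse ++ (mySplitP l).1) :: (mySplitP l).2 := by
  induction fuel with
  | zero =>
    intro l cur acc h
    have : l = [] := List.eq_nil_of_length_eq_zero (Nat.le_zero.mp h)
    subst this
    rw [PySem.Chars.splitOn.go.eq_def]
    simp [mySplitP]
  | succ fuel IH =>
    intro l cur acc h
    cases l with
    | nil =>
      rw [PySem.Chars.splitOn.go.eq_def]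
      simp [mySplitP]
    | cons c rest =>
      rw [PySem.Chars.splitOn.go.eq_def]
      by_cases hc : c = ' '
      · subst hc
        have hpre : List.isPrefixOf [' '] (' ' :: rest) = true := by simp [List.isPrefixOf]
        simp only [hpre, if_pos, List.length_cons, List.length_nil, List.drop_succ_cons, List.drop_zero]
        rw [IH rest [] (cur.reverse :: acc) (by simpa using Nat.le_of_succ_le_succ h)]
        simp [mySplitP]
      · have hpre : List.isPrefixOf [' '] (c :: rest) = false := by
          simp [List.isPrefixOf]; exact fun hh => (hc hh.symm).elim
        simp only [hpre]
        rw [if_neg (by simp)]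
        rw [IH rest (c :: cur) acc (by simpa using Nat.le_of_succ_le_succ h)]
        simp [mySplitP, hc]

theorem splitOn_eq (cs : List Char) :
    PySem.Chars.splitOn cs [' '] = (mySplitP cs).1 :: (mySplitP cs).2 := by
  show PySem.Chars.splitOn.go [' '] (cs.length + 1) cs [] [] = _
  rw [go_eq (cs.length + 1) cs [] [] (by omega)]
  simp

theorem trimLeadA_suffix (xs : List Char) : trimLeadA xs <:+ xs := by
  induction xs with
  | nil => simp [trimLeadA]
  | cons c r IH =>
    by_cases hc : c = ' '
    · simpa [trimLeadA, hc] using IH.trans (List.suffix_cons c r)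
    · simp [trimLeadA, hc]

theorem head?_trimLeadA (xs : List Char) : (trimLeadA xs).head? ≠ some ' ' := by
  induction xs with
  | nil => simp [trimLeadA]
  | cons c r IH =>
    by_cases hc : c = ' '
    · simpa [trimLeadA, hc] using IH
    · simp [trimLeadA, hc]

theorem g_nil : gVal [] = [] := by simp [gVal, mySplitP, PySem.Chars.join_nil]

theorem g_space (ds : List Char) : gVal (' ' :: ds) = gVal ds := by
  simp [gVal, mySplitP]

theorem g_cons {c : Char} (hc : c ≠ ' ') (ds : List Char) : gVal (c :: ds) = c :: wRest ds := by
  simp only [gVal, wRest, mySplitP, if_neg hc]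
  rw [List.filter_cons]
  simp only [ne_eq, List.cons_ne_nil, not_false_eq_true, decide_true, if_pos]
  cases hfs : ((mySplitP ds).2).filter (fun w => w ≠ ([] : List Char)) with
  | nil => simp [PySem.Chars.join_singleton, joinTail]
  | cons f fs =>
    rw [PySem.Chars.join_cons_cons]
    simp [joinTail]

theorem w_nil : wRest [] = [] := by simp [wRest, mySplitP, joinTail]

theorem w_cons {c : Char} (hc : c ≠ ' ') (ds : List Char) : wRest (c :: ds) = c :: wRest ds := by
  simp [wRest, mySplitP, hc]

theorem w_space (ds : List Char) :
    wRest (' ' :: ds) = joinTail ((((mySplitP ds).1 :: (mySplitP ds).2)).filter (fun w => w ≠ ([] : List Char))) := by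
  simp [wRest, mySplitP]

theorem filter_ne_of_mem (ds : List Char) : ∀ x ∈ ds, x ≠ ' ' →
    (((mySplitP ds).1 :: (mySplitP ds).2)).filter (fun w => w ≠ ([] : List Char)) ≠ [] := by
  induction ds with
  | nil => intro x hx; simp at hx
  | cons c r IH =>
    intro x hx hxs
    by_cases hc : c = ' '
    · subst hc
      have hxr : x ∈ r := by
        rcases List.mem_cons.mp hx with h | h
        · exact absurd h hxs
        · exact h
      have := IH x hxr hxs
      simpa [mySplitP, List.filter_cons] using this
    · simp [mySplitP, hc]

theorem noTrail_tail {d : Char} {ds : List Char} (h : (d :: ds).getLast? ≠ some ' ') :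
    ds.getLast? ≠ some ' ' := by
  cases ds with
  | nil => simp
  | cons e es => simpa [List.getLast?_cons_cons] using h

theorem main_f (ds : List Char) (hT : ds.getLast? ≠ some ' ') :
    (∀ c : Char, c ≠ ' ' → collapseF (some c) ds = wRest ds) ∧ (collapseF (some ' ') ds = gVal ds) := by
  induction ds with
  | nil => exact ⟨fun c hc => by simp [collapseF, w_nil], by simp [collapseF, g_nil]⟩
  | cons d ds IH =>
    have hT' : ds.getLast? ≠ some ' ' := noTrail_tail hT
    obtain ⟨IHb, IHc⟩ := IH hT'
    constructor
    · intro c hc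
      by_cases hd : d = ' '
      · subst hd
        have hne : ds ≠ [] := by rintro rfl; simp at hT
        have hlast : ds.getLast? = some (ds.getLast hne) := List.getLast?_eq_some_getLast hne
        have hxs : ds.getLast hne ≠ ' ' := by
          intro hh; rw [hlast, hh] at hT'; exact hT' rfl
        have hfil := filter_ne_of_mem ds (ds.getLast hne) (List.getLast_mem hne) hxs
        rw [w_space]
        have hcoll : collapseF (some c) (' ' :: ds) = ' ' :: collapseF (some ' ') ds := by
          simp [collapseF, hc]
        rw [hcoll, IHc]
        cases hfs : (((mySplitP ds).1 :: (mySplitP ds).2)).filter (fun w => w ≠ ([] : List Char)) with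
        | nil => exact absurd hfs hfil
        | cons f fs =>
          simp only [ne_eq, decide_not] at hfs
          simp only [joinTail, gVal, ne_eq, decide_not, hfs]
      · have hcoll : collapseF (some c) (d :: ds) = d :: collapseF (some d) ds := by
          simp [collapseF, hd]
        rw [hcoll, IHb d hd, w_cons hd]
    · by_cases hd : d = ' '
      · subst hd
        have hcoll : collapseF (some ' ') (' ' :: ds) = collapseF (some ' ') ds := by
          simp [collapseF]
        rw [hcoll, IHc, g_space]
      · have hcoll : collapseF (some ' ') (d :: ds) = d :: collapseF (some d) ds := by
          simp [collapseF, hd]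
        rw [hcoll, IHb d hd, g_cons hd]

theorem f_none (ds : List Char) (hH : ds.head? ≠ some ' ') (hT : ds.getLast? ≠ some ' ') :
    collapseF none ds = gVal ds := by
  cases ds with
  | nil => simp [collapseF, g_nil]
  | cons d ds =>
    have hd : d ≠ ' ' := by simpa using hH
    have hcoll : collapseF none (d :: ds) = d :: collapseF (some d) ds := by
      simp [collapseF, hd]
    rw [hcoll, (main_f ds (noTrail_tail hT)).1 d hd, g_cons hd]

theorem g_trimLead (cs : List Char) : gVal (trimLeadA cs) = gVal cs := by
  induction cs with
  | nil => rfl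
  | cons c r IH =>
    by_cases hc : c = ' '
    · subst hc; rw [show trimLeadA (' ' :: r) = trimLeadA r from by simp [trimLeadA], IH, g_space]
    · simp [trimLeadA, hc]

theorem mySplitP_snoc_space (ys : List Char) :
    mySplitP (ys ++ [' ']) = ((mySplitP ys).1, (mySplitP ys).2 ++ [[]]) := by
  induction ys with
  | nil => simp [mySplitP]
  | cons c r IH =>
    by_cases hc : c = ' ' <;> simp [mySplitP, hc, IH]

theorem g_snoc_space (ys : List Char) : gVal (ys ++ [' ']) = gVal ys := by
  have hf : ((mySplitP ys).2 ++ [[]]).filter (fun w => (w : List Char) ≠ []) = ((mySplitP ys).2).filter (fun w => w ≠ ([] : List Char)) := by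
    simp [List.filter_append]
  simp only [gVal, mySplitP_snoc_space, List.filter_cons] at *
  rw [hf]

theorem g_trimTrail (xs : List Char) : gVal ((trimLeadA xs).reverse) = gVal xs.reverse := by
  induction xs with
  | nil => rfl
  | cons c r IH =>
    by_cases hc : c = ' '
    · subst hc
      rw [show trimLeadA (' ' :: r) = trimLeadA r from by simp [trimLeadA], IH]
      rw [show (' ' :: r).reverse = r.reverse ++ [' '] from by simp, g_snoc_space]
    · simp [trimLeadA, hc]

theorem core_facts (cs : List Char) :
    ((trimLeadA (trimLeadA cs).reverse).reverse.head? ≠ some ' ') ∧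
    ((trimLeadA (trimLeadA cs).reverse).reverse.getLast? ≠ some ' ') ∧
    (gVal (trimLeadA (trimLeadA cs).reverse).reverse = gVal cs) := by
  refine ⟨?_, ?_, ?_⟩
  · rw [List.head?_reverse]
    cases hu : trimLeadA (trimLeadA cs).reverse with
    | nil => simp
    | cons a u =>
      obtain ⟨t, ht⟩ := trimLeadA_suffix (trimLeadA cs).reverse
      have hsome : ((a :: u).getLast?).isSome := by
        rw [List.getLast?_isSome]; simp
      rw [hu] at ht
      have h1 : (a :: u).getLast? = (t ++ a :: u).getLast? := by
        rw [List.getLast?_append, Option.or_of_isSome hsome]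
      rw [h1, ht, List.getLast?_reverse]
      exact head?_trimLeadA cs
  · rw [List.getLast?_reverse]
    exact head?_trimLeadA _
  · rw [g_trimTrail, List.reverse_reverse, g_trimLead]

-- ===== VERDICT (by name: the statement is the Claim_ definition above) =====
theorem trim_spaces_spec : Claim_equal_trim_spaces := by
  intro s _
  unfold Spec_trim_spaces trim_spaces trim_spaces_alt
  obtain ⟨hH, hT, hG⟩ := core_facts s.toList
  have h1 : scanA [] (trimLeadA (trimLeadA s.toList).reverse).reverse
      = collapseF none (trimLeadA (trimLeadA s.toList).reverse).reverse := by
    simpa using scanA_eq _ []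
  dsimp only
  rw [h1, f_none _ hH hT, hG, splitOn_eq]
  rfl
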